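-- pv_equiv track=rewrite | github.com/JacopoCarlon/JC_HackerRank | 1_Month_Preparation_Kit/1MPK_W2/1MPK_W2_Counter_Game.py | counterGame
-- ===== SOURCE A (Python) =====
-- def counterGame(n):
--     # Write your code here
--
--     count = 0
--     while n > 1:
--         if n%2==0:
--             count +=1
--             n = n//2
--         else :
--             break
--     ## arrive here, 132 -> 66 -> 33 -> 100001
--     ## if i do 33%2->1 and 33//2-> even! so i count once as desired
--     while n > 1:
--         if n%2 == 1:
--             count += 1
--         n = n//2
--
--     return "Richard" if count%2==0 else "Louise"
-- ===== SOURCE B (Python) =====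
-- def counterGame(n):
--     # Each halving of a trailing zero and each removal of a set bit (except the
--     # leading one) is a move; that total equals popcount(n - 1).
--     if n <= 1:
--         return "Richard"
--     count = bin(n - 1).count("1")
--     return "Richard" if count % 2 == 0 else "Louise"
-- ===== Notes on version B (the rewrite author's own statement) =====
-- stated objective: simpler
-- what changed: Replaced A's two while-loops (strip trailing zeros, then count odd bits while halving) by the closed-form observation that the move count equals the popcount of n-1, computed with bin(n-1).count('1').
import Mathlib
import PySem

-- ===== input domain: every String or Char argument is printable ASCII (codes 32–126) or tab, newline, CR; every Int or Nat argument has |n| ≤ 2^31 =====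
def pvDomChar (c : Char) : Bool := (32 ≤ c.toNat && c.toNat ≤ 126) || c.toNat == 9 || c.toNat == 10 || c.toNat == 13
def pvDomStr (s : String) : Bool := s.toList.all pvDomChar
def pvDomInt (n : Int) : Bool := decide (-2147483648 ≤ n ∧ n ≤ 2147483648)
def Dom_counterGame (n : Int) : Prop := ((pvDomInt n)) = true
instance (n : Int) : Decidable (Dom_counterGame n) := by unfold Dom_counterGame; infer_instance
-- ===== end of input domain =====

-- B replaces A's two while-loops by the closed form popcount(n-1); objective: simpler.

-- ===== PORT A =====
-- first while loop: strip trailing zero bits, counting them; breaks at the first odd value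
def cgLoop1 (n count : Int) : Int × Int :=
  if h : 1 < n then
    if PySem.Int.mod n 2 == 0 then
      cgLoop1 (PySem.Int.floordiv n 2) (count + 1)
    else (n, count)
  else (n, count)
termination_by n.toNat
decreasing_by
  rw [PySem.Int.floordiv_eq_ediv_of_pos (by omega)]
  omega

-- second while loop: count odd bits while halving
def cgLoop2 (n count : Int) : Int :=
  if h : 1 < n then
    cgLoop2 (PySem.Int.floordiv n 2) (if PySem.Int.mod n 2 == 1 then count + 1 else count)
  else count
termination_by n.toNat
decreasing_by
  rw [PySem.Int.floordiv_eq_ediv_of_pos (by omega)]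
  omega

def counterGame (n : Int) : String :=
  if PySem.Int.mod (cgLoop2 (cgLoop1 n 0).1 (cgLoop1 n 0).2) 2 == 0 then "Richard" else "Louise"

-- ===== PORT B =====
-- bin(n-1).count("1") is ported as PySem.Int.bitCount (exact: n - 1 ≥ 0 holds on this branch)
def counterGame_alt (n : Int) : String :=
  if n ≤ 1 then "Richard"
  else if PySem.Int.bitCount (n - 1) % 2 == 0 then "Richard" else "Louise"

-- ===== PRECONDITION & SPEC =====
def Spec_counterGame (n : Int) (out : String) : Prop := out = counterGame_alt n
instance (n : Int) (out : String) : Decidable (Spec_counterGame n out) := by unfold Spec_counterGame; infer_instance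

-- ===== CLAIM (what is proved, stated in full; the proofs are below) =====
def Claim_equal_counterGame : Prop := ∀ (n : Int), Dom_counterGame n → Spec_counterGame n (counterGame n)

-- ===== LEMMAS AND PROOFS =====

-- the second loop adds (popcount n − 1) to its accumulator, for n ≥ 1
theorem cgLoop2_eq (m : Nat) : ∀ (n c : Int), n.toNat ≤ m → 1 ≤ n →
    cgLoop2 n c = c + (PySem.Int.bitCount n : Int) - 1 := by
  induction m with
  | zero => intro n c hle h1; omega
  | succ m ih =>
    intro n c hle h1
    by_cases h : 1 < n
    · rw [cgLoop2]
      simp only [h, dif_pos]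
      have hfd : PySem.Int.floordiv n 2 = n / 2 :=
        PySem.Int.floordiv_eq_ediv_of_pos (by omega)
      rw [ih (PySem.Int.floordiv n 2) _ (by rw [hfd]; omega) (by rw [hfd]; omega)]
      rw [PySem.Int.bitCount_of_pos (show (0:Int) < n by omega)]
      have hme : PySem.Int.mod n 2 = n % 2 := PySem.Int.mod_eq_emod_of_pos (by omega)
      by_cases hodd : n % 2 = 1
      · simp only [hme, hodd, BEq.rfl, if_pos]
        push_cast
        omega
      · have h0 : n % 2 = 0 := by omega
        simp only [hme, h0, show ((0:Int) == 1) = false from rfl, Bool.false_eq_true,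
          not_false_iff, if_neg]
        push_cast
        omega
    · have hn1 : n = 1 := by omega
      subst hn1
      rw [cgLoop2]
      norm_num
      rw [show PySem.Int.bitCount 1 = 1 from by decide]
      push_cast
      ring
-- the whole of A's computation equals c + popcount (n − 1), for n ≥ 1
theorem cgLoops_eq (m : Nat) : ∀ (n c : Int), n.toNat ≤ m → 1 ≤ n →
    cgLoop2 (cgLoop1 n c).1 (cgLoop1 n c).2 = c + (PySem.Int.bitCount (n - 1) : Int) := by
  induction m with
  | zero => intro n c hle h1; omega
  | succ m ih =>
    intro n c hle h1
    by_cases h : 1 < n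
    · rw [cgLoop1]
      simp only [h, dif_pos]
      have hme : PySem.Int.mod n 2 = n % 2 := PySem.Int.mod_eq_emod_of_pos (by omega)
      have hfd : PySem.Int.floordiv n 2 = n / 2 :=
        PySem.Int.floordiv_eq_ediv_of_pos (by omega)
      by_cases hev : n % 2 = 0
      · simp only [hme, hev, BEq.rfl, if_pos]
        rw [ih (PySem.Int.floordiv n 2) _ (by rw [hfd]; omega) (by rw [hfd]; omega)]
        -- popcount (n-1) = popcount (n/2 - 1) + 1 for even n > 1
        rw [PySem.Int.bitCount_of_pos (show (0:Int) < n - 1 by omega)]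
        have hme1 : PySem.Int.mod (n-1) 2 = (n-1) % 2 := PySem.Int.mod_eq_emod_of_pos (by omega)
        have hfd1 : PySem.Int.floordiv (n-1) 2 = (n-1) / 2 :=
          PySem.Int.floordiv_eq_ediv_of_pos (by omega)
        have e1 : (n-1) % 2 = 1 := by omega
        have e2 : (n-1) / 2 = n / 2 - 1 := by omega
        rw [hme1, hfd1, e1, e2, hfd]
        push_cast
        omega
      · have hodd : n % 2 = 1 := by omega
        simp only [hme, hodd, show ((1:Int) == 0) = false from rfl, if_neg, Bool.false_eq_true,
          not_false_iff]
        rw [cgLoop2_eq n.toNat n c (le_refl _) (by omega)]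
        -- popcount n − 1 = popcount (n − 1) for odd n > 1
        rw [PySem.Int.bitCount_of_pos (show (0:Int) < n by omega),
            PySem.Int.bitCount_of_pos (show (0:Int) < n - 1 by omega)]
        have hme1 : PySem.Int.mod (n-1) 2 = (n-1) % 2 := PySem.Int.mod_eq_emod_of_pos (by omega)
        have hfd1 : PySem.Int.floordiv (n-1) 2 = (n-1) / 2 :=
          PySem.Int.floordiv_eq_ediv_of_pos (by omega)
        have e1 : (n-1) % 2 = 0 := by omega
        have e2 : (n-1) / 2 = n / 2 := by omega
        rw [hme, hme1, hfd, hfd1, hodd, e1, e2]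
        push_cast
        omega
    · have hn1 : n = 1 := by omega
      subst hn1
      rw [cgLoop1]
      norm_num
      rw [cgLoop2]
      norm_num

-- ===== VERDICT (by name: the statement is the Claim_ definition above) =====
theorem counterGame_spec : Claim_equal_counterGame := by
  intro n _
  unfold Spec_counterGame counterGame counterGame_alt
  by_cases h : n ≤ 1
  · -- both loops are skipped; count stays 0
    have e1 : cgLoop1 n 0 = (n, 0) := by
      rw [cgLoop1]; simp [show ¬ (1:Int) < n by omega]
    have e2 : cgLoop2 n 0 = 0 := by
      rw [cgLoop2]; simp [show ¬ (1:Int) < n by omega]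
    simp [e1, e2, h]
  · rw [cgLoops_eq n.toNat n 0 (le_refl _) (by omega), zero_add]
    rw [show ((2:Int)) = ((2:Nat):Int) from rfl, PySem.Int.mod_natCast]
    by_cases hp : PySem.Int.bitCount (n-1) % 2 = 0
    · simp [hp, h]
    · simp [hp, h]
      omega
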